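-- pv_equiv track=rewrite | github.com/maolonchen/kb_cls_grad | app/services/file_recognition_service.py | _extract_content_from_markdown
-- ===== SOURCE A (Python) =====
-- def _extract_content_from_markdown(markdown_text: str, max_chars: int = 900) -> str:
--     """
--     从Markdown文本中提取内容：每个大小标题(即带"#"的行)和标题行下方的第一行文字
--
--     Args:
--         markdown_text: Markdown文本
--         max_chars: 最大字符数
--
--     Returns:
--         str: 提取的内容
--     """
--     lines = markdown_text.split('\n')
--     extracted_content = []
--     char_count = 0
--
--     i = 0
--     while i < len(lines) and char_count < max_chars:
--         line = lines[i]
--         # 如果是标题行（以#开头）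
--         if line.strip().startswith('#'):
--             # 添加标题行
--             if char_count + len(line) > max_chars:
--                 remaining_chars = max_chars - char_count
--                 extracted_content.append(line[:remaining_chars])
--                 char_count = max_chars
--                 break
--             else:
--                 extracted_content.append(line)
--                 char_count += len(line)
--
--             # 查找标题行下方的第一行非空文字
--             j = i + 1
--             while j < len(lines):
--                 next_line = lines[j].strip()
--                 if next_line and not next_line.startswith('#'):  # 非空且不是标题
--                     # 添加内容行
--                     if char_count + len(next_line) > max_chars:
--                         remaining_chars = max_chars - char_count
--                         extracted_content.append(
--                             next_line[:remaining_chars])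
--                         char_count = max_chars
--                     else:
--                         extracted_content.append(next_line)
--                         char_count += len(next_line)
--                     break
--                 j += 1
--         i += 1
--
--     return '\n'.join(extracted_content)
-- ===== SOURCE B (Python) =====
-- def _extract_content_from_markdown(markdown_text: str, max_chars: int = 900) -> str:
--     # Two-pass rewrite: pair each heading with its first following content line, then apply the char budget.
--     lines = markdown_text.split('\n')
--     # backward pass: for each heading line, the first non-empty non-heading line after it
--     pairs = []          # built back-to-front, then reversed into document order
--     first_content = None
--     for line in reversed(lines):
--         s = line.strip()
--         if s.startswith('#'):
--             pairs.append((line, first_content))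
--         elif s:
--             first_content = s
--     pairs.reverse()
--     # forward pass: apply the character budget
--     out = []
--     count = 0
--     for heading, content in pairs:
--         if count >= max_chars:
--             break
--         if count + len(heading) > max_chars:
--             out.append(heading[:max_chars - count])
--             break
--         out.append(heading)
--         count += len(heading)
--         if content is not None:
--             if count + len(content) > max_chars:
--                 out.append(content[:max_chars - count])
--                 count = max_chars
--             else:
--                 out.append(content)
--                 count += len(content)
--     return '\n'.join(out)
-- ===== Notes on version B (the rewrite author's own statement) =====
-- stated objective: alternative
-- what changed: A interleaves the char-budget bookkeeping with a nested forward scan for each heading's content line; B first pairs every heading with its first following non-empty non-heading line in one backward pass, then applies the character budget in a separate forward pass over the pairs.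
import Mathlib
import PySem

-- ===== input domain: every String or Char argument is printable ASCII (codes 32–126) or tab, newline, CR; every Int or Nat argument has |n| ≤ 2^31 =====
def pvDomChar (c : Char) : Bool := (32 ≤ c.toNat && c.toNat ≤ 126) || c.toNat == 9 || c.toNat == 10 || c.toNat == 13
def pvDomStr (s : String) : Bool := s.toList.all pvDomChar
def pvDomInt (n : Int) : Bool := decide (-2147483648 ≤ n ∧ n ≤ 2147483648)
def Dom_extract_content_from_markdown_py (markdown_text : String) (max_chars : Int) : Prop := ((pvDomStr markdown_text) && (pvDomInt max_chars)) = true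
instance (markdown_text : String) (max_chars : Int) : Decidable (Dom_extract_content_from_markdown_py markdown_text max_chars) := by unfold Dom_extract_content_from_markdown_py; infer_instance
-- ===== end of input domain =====

-- B replaces A's interleaved scan-within-scan by two passes (pair headings with their
-- first following content line, then apply the char budget); objective: alternative decomposition.

-- ===== PORT A =====
-- inner 'while j < len(lines)' of A: scan `ls` for the first non-empty non-heading stripped
-- line, append it (possibly truncated) to acc, returning (extracted_content, char_count)
def pvAInner (ls : List String) (cc mx : Int) (acc : List String) : List String × Int :=
  match ls with
  | [] => (acc, cc)
  | l :: rest =>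
    let nl := PySem.Str.strip l
    if nl ≠ "" ∧ PySem.Str.startswith nl "#" = false then
      if cc + PySem.Str.len nl > mx then
        (acc ++ [PySem.Str.slice nl none (some (mx - cc))], mx)
      else
        (acc ++ [nl], cc + PySem.Str.len nl)
    else pvAInner rest cc mx acc

-- outer 'while i < len(lines) and char_count < max_chars' of A
def pvAOuter (ls : List String) (cc mx : Int) (acc : List String) : List String :=
  match ls with
  | [] => acc
  | l :: rest =>
    if cc < mx then
      if PySem.Str.startswith (PySem.Str.strip l) "#" then
        if cc + PySem.Str.len l > mx then
          acc ++ [PySem.Str.slice l none (some (mx - cc))]   -- truncate and break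
        else
          let st := pvAInner rest (cc + PySem.Str.len l) mx (acc ++ [l])
          pvAOuter rest st.2 mx st.1
      else pvAOuter rest cc mx acc
    else acc

def extract_content_from_markdown_py (markdown_text : String) (max_chars : Int) : String :=
  -- split('\n') with the nonempty literal separator: split? is always `some` here
  let lines := (PySem.Str.split? markdown_text "\n").getD []
  PySem.Str.join "\n" (pvAOuter lines 0 max_chars [])

-- ===== PORT B =====
-- B's backward pass over reversed(lines) building pairs back-to-front then reversing is,
-- as a recursion on the list, a fold from the right: returns (pairs in document order,
-- first non-empty non-heading stripped line of ls, i.e. B's `first_content`)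
def pvBPairs (ls : List String) : List (String × Option String) × Option String :=
  match ls with
  | [] => ([], none)
  | l :: rest =>
    let p := pvBPairs rest
    let s := PySem.Str.strip l
    if PySem.Str.startswith s "#" then ((l, p.2) :: p.1, p.2)
    else if s ≠ "" then (p.1, some s)
    else p

-- B's forward budget pass over the heading/content pairs
def pvBBudget (ps : List (String × Option String)) (cc mx : Int) : List String :=
  match ps with
  | [] => []
  | (h, c) :: rest =>
    if cc ≥ mx then []
    else if cc + PySem.Str.len h > mx then
      [PySem.Str.slice h none (some (mx - cc))]
    else
      let cc1 := cc + PySem.Str.len h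
      match c with
      | none => h :: pvBBudget rest cc1 mx
      | some ct =>
        if cc1 + PySem.Str.len ct > mx then
          h :: PySem.Str.slice ct none (some (mx - cc1)) :: pvBBudget rest mx mx
        else
          h :: ct :: pvBBudget rest (cc1 + PySem.Str.len ct) mx

def extract_content_from_markdown_py_alt (markdown_text : String) (max_chars : Int) : String :=
  let lines := (PySem.Str.split? markdown_text "\n").getD []
  PySem.Str.join "\n" (pvBBudget (pvBPairs lines).1 0 max_chars)

-- ===== PRECONDITION & SPEC =====
def Spec_extract_content_from_markdown_py (markdown_text : String) (max_chars : Int) (out : String) : Prop := out = extract_content_from_markdown_py_alt markdown_text max_chars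
instance (markdown_text : String) (max_chars : Int) (out : String) : Decidable (Spec_extract_content_from_markdown_py markdown_text max_chars out) := by unfold Spec_extract_content_from_markdown_py; infer_instance

-- ===== CLAIM (what is proved, stated in full; the proofs are below) =====
def Claim_equal_extract_content_from_markdown_py : Prop := ∀ (markdown_text : String) (max_chars : Int), Dom_extract_content_from_markdown_py markdown_text max_chars → Spec_extract_content_from_markdown_py markdown_text max_chars (extract_content_from_markdown_py markdown_text max_chars)

-- ===== LEMMAS AND PROOFS =====

-- once the budget is exhausted, B's second pass emits nothing
theorem pvBBudget_of_ge (ps : List (String × Option String)) {cc mx : Int} (h : cc ≥ mx) :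
    pvBBudget ps cc mx = [] := by
  cases ps with
  | nil => rfl
  | cons p rest => obtain ⟨hd, c⟩ := p; simp only [pvBBudget, if_pos h]

-- A's inner scan computes exactly what B precomputed as `first_content` for the suffix
theorem pvAInner_eq (ls : List String) (cc mx : Int) (acc : List String) :
    pvAInner ls cc mx acc =
      match (pvBPairs ls).2 with
      | none => (acc, cc)
      | some ct =>
        if cc + PySem.Str.len ct > mx then
          (acc ++ [PySem.Str.slice ct none (some (mx - cc))], mx)
        else (acc ++ [ct], cc + PySem.Str.len ct) := by
  induction ls with
  | nil => rfl
  | cons l rest ih =>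
    by_cases hs : PySem.Str.startswith (PySem.Str.strip l) "#" = true
    · have hna : ¬ (PySem.Str.strip l ≠ "" ∧ PySem.Str.startswith (PySem.Str.strip l) "#" = false) :=
        fun h => by rw [h.2] at hs; exact Bool.false_ne_true hs
      simp only [pvAInner, pvBPairs, if_neg hna, if_pos hs]
      exact ih
    · have hsf : PySem.Str.startswith (PySem.Str.strip l) "#" = false := by
        simp only [Bool.not_eq_true] at hs; exact hs
      by_cases he : PySem.Str.strip l = ""
      · have hna : ¬ (PySem.Str.strip l ≠ "" ∧ PySem.Str.startswith (PySem.Str.strip l) "#" = false) :=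
          fun h => h.1 he
      
        simp only [pvAInner, pvBPairs, if_neg hna, if_neg hs, if_neg (fun h : PySem.Str.strip l ≠ "" => h he)]
        exact ih
      · simp only [pvAInner, pvBPairs, if_pos (And.intro he hsf), if_neg hs, if_pos he]

-- main invariant: A's outer loop = B's budget pass over the precomputed pairs
theorem pvAOuter_eq (ls : List String) (mx : Int) :
    ∀ (cc : Int) (acc : List String),
      pvAOuter ls cc mx acc = acc ++ pvBBudget (pvBPairs ls).1 cc mx := by
  induction ls with
  | nil => intro cc acc; simp only [pvAOuter, pvBPairs, pvBBudget, List.append_nil]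
  | cons l rest ih =>
    intro cc acc
    by_cases hlt : cc < mx
    · have hnge : ¬ cc ≥ mx := by omega
      by_cases hs : PySem.Str.startswith (PySem.Str.strip l) "#" = true
      · by_cases hov : cc + PySem.Str.len l > mx
        · simp only [pvAOuter, pvBPairs, if_pos hlt, if_pos hs, if_pos hov, pvBBudget,
            if_neg hnge]
        · simp only [pvAOuter, pvBPairs, if_pos hlt, if_pos hs, if_neg hov, pvAInner_eq,
            pvBBudget, if_neg hnge]
          cases hfc : (pvBPairs rest).2 with
          | none => simp only [ih]; simp
          | some ct =>
            by_cases hov2 : cc + PySem.Str.len l + PySem.Str.len ct > mx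
            · simp only [if_pos hov2, ih]; simp
            · simp only [if_neg hov2, ih]; simp
      · -- not a heading: no pair added, state unchanged
        simp only [pvAOuter, pvBPairs, if_pos hlt, if_neg hs]
        by_cases he : PySem.Str.strip l = ""
        · simp only [if_neg (fun h => h he : ¬ PySem.Str.strip l ≠ ""), ih]
        · simp only [if_pos (he : PySem.Str.strip l ≠ ""), ih]
    · -- budget already exhausted: A stops, B's pass emits nothing
      have hge : cc ≥ mx := by omega
      simp only [pvAOuter, if_neg hlt]
      by_cases hs : PySem.Str.startswith (PySem.Str.strip l) "#" = true
      · simp only [pvBPairs, if_pos hs, pvBBudget, if_pos hge, List.append_nil]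
      · simp only [pvBPairs, if_neg hs]
        by_cases he : PySem.Str.strip l = ""
        · simp only [if_neg (fun h => h he : ¬ PySem.Str.strip l ≠ ""),
            pvBBudget_of_ge _ hge, List.append_nil]
        · simp only [if_pos (he : PySem.Str.strip l ≠ ""), pvBBudget_of_ge _ hge, List.append_nil]

-- ===== VERDICT (by name: the statement is the Claim_ definition above) =====
theorem extract_content_from_markdown_py_spec : Claim_equal_extract_content_from_markdown_py := by
  intro markdown_text max_chars _
  unfold Spec_extract_content_from_markdown_py
  unfold extract_content_from_markdown_py extract_content_from_markdown_py_alt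
  simp only [pvAOuter_eq, List.nil_append]
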